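-- pv_equiv track=rewrite | github.com/jose803196/Problemas-resueltos-de-La-guia-de-programaci-n-UCV | Problema155.py | matrix_zz
-- ===== SOURCE A (Python) =====
-- def matrix_zz(row_1,col_1):
-- 	"""Regresa al usuario la matriz NxM en zig-zag horizontal"""
-- 	#Creo una matriz vacia y un contador
-- 	A = []
-- 	k = 1
-- 	for i in range(0,row_1):
-- 		lista_aux = []
-- 		for j in range(0, col_1):
-- 			lista_aux.append(k)
-- 			k += 1
-- 		if (i % 2 ) != 0:
-- 			#Invierto las filas pares como en el ejemplo
-- 			A.append(list(reversed(lista_aux)))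
-- 		else:
-- 			A.append(lista_aux)
-- 	return (A)
-- ===== SOURCE B (Python) =====
-- def matrix_zz(row_1, col_1):
--     """Regresa al usuario la matriz NxM en zig-zag horizontal"""
--     # Every entry is computed directly from its coordinates (i, j):
--     # no running counter and no row reversal anywhere.
--     return [
--         [i * col_1 + (col_1 - j if i % 2 else j + 1) for j in range(col_1)]
--         for i in range(row_1)
--     ]
-- ===== Notes on version B (the rewrite author's own statement) =====
-- stated objective: alternative
-- what changed: Each matrix entry is computed directly from its coordinates (i,j) by the closed form i*col+(col-j) or i*col+(j+1) depending on row parity, eliminating both A's running counter and its row reversal.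
import Mathlib
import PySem

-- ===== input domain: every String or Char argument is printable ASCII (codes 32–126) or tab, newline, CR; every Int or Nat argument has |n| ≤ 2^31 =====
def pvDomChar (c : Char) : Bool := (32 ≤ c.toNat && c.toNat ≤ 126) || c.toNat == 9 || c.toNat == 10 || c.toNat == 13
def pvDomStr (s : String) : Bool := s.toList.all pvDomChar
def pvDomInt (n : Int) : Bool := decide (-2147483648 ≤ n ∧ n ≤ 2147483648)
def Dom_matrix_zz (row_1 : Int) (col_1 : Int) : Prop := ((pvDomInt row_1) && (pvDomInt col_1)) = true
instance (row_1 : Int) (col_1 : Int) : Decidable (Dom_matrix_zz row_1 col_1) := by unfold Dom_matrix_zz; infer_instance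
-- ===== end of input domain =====

-- B computes every entry directly from its coordinates (i,j) by a parity-dependent closed form, eliminating A's running counter and its row reversal (objective: alternative).


-- ===== PORT A =====
-- literal transliteration: outer fold carries (A, k); inner fold does lista_aux.append(k); k += 1.
-- Both .append loops accumulate by cons and reverse at the end (the standard linear-time rendering
-- of list.append); lista_aux is therefore inner.1.reverse, and list(reversed(lista_aux)) is its .reverse.
def matrix_zz (row_1 : Int) (col_1 : Int) : List (List Int) :=
  let st := (PySem.List.pyRange 0 row_1 1).foldl
    (fun (st : List (List Int) × Int) i =>
      let inner := (PySem.List.pyRange 0 col_1 1).foldl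
        (fun (st2 : List Int × Int) _j => (st2.2 :: st2.1, st2.2 + 1)) ([], st.2)
      (if PySem.Int.mod i 2 ≠ 0 then inner.1.reverse.reverse :: st.1 else inner.1.reverse :: st.1,
       inner.2))
    ([], 1)
  st.1.reverse

-- ===== PORT B =====
-- literal transliteration of Source B: nested comprehension, each entry from its coordinates
def matrix_zz_alt (row_1 : Int) (col_1 : Int) : List (List Int) :=
  (PySem.List.pyRange 0 row_1 1).map (fun i =>
    (PySem.List.pyRange 0 col_1 1).map (fun j =>
      if PySem.Int.mod i 2 ≠ 0 then i * col_1 + (col_1 - j) else i * col_1 + (j + 1)))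

-- ===== PRECONDITION & SPEC =====
def Spec_matrix_zz (row_1 : Int) (col_1 : Int) (out : List (List Int)) : Prop := out = matrix_zz_alt row_1 col_1
instance (row_1 : Int) (col_1 : Int) (out : List (List Int)) : Decidable (Spec_matrix_zz row_1 col_1 out) := by unfold Spec_matrix_zz; infer_instance

-- ===== CLAIM (what is proved, stated in full; the proofs are below) =====
def Claim_equal_matrix_zz : Prop := ∀ (row_1 : Int) (col_1 : Int), Dom_matrix_zz row_1 col_1 → Spec_matrix_zz row_1 col_1 (matrix_zz row_1 col_1)

-- ===== LEMMAS AND PROOFS =====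

-- A's inner loop conses l.length consecutive integers starting at k (so .1 is lista_aux reversed)
theorem inner_fold_eq (l : List Int) (acc : List Int) (k : Int) :
    l.foldl (fun (st2 : List Int × Int) _j => (st2.2 :: st2.1, st2.2 + 1)) (acc, k)
      = ((PySem.List.pyRange k (k + l.length) 1).reverse ++ acc, k + l.length) := by
  induction l generalizing acc k with
  | nil =>
    simp only [List.foldl_nil, List.length_nil, Nat.cast_zero, add_zero]
    rw [PySem.List.pyRange_one_eq_nil (le_refl k)]
    simp
  | cons x xs ih =>
    simp only [List.foldl_cons]
    rw [ih]
    have h : (k : Int) < k + ((x :: xs).length : Int) := by simp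
    rw [PySem.List.pyRange_one_cons h]
    simp only [List.length_cons, List.reverse_cons]
    push_cast
    rw [show k + ((xs.length : Int) + 1) = k + 1 + (xs.length : Int) from by ring]
    simp [List.append_assoc]

-- an even row of A equals B's coordinate formula for that row
theorem rowA_even (c i : Int) :
    PySem.List.pyRange (i * ((c.toNat : Int)) + 1)
        (i * ((c.toNat : Int)) + 1 + ((PySem.List.pyRange 0 c 1).length : Int)) 1
      = (PySem.List.pyRange 0 c 1).map (fun j => i * c + (j + 1)) := by
  by_cases hc : 0 < c
  · have hce : ((c.toNat : Int)) = c := by omega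
    have hlen : ((PySem.List.pyRange 0 c 1).length : Int) = c := by
      rw [PySem.List.length_pyRange_one]; omega
    rw [hce, hlen]
    generalize i * c = t
    apply List.ext_getElem
    · simp only [PySem.List.length_pyRange_one, List.length_map]; omega
    · intro k h1 h2
      simp only [PySem.List.length_pyRange_one] at h1
      simp only [PySem.List.getElem_pyRange_one, List.getElem_map]
      omega
  · have hnil : PySem.List.pyRange 0 c 1 = [] := PySem.List.pyRange_one_eq_nil (by omega)
    rw [hnil]
    simp only [List.length_nil, Nat.cast_zero, add_zero, List.map_nil]
    exact PySem.List.pyRange_one_eq_nil le_rfl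

-- a reversed odd row of A equals B's coordinate formula for that row
theorem rowA_odd (c i : Int) :
    (PySem.List.pyRange (i * ((c.toNat : Int)) + 1)
        (i * ((c.toNat : Int)) + 1 + ((PySem.List.pyRange 0 c 1).length : Int)) 1).reverse
      = (PySem.List.pyRange 0 c 1).map (fun j => i * c + (c - j)) := by
  by_cases hc : 0 < c
  · have hce : ((c.toNat : Int)) = c := by omega
    have hlen : ((PySem.List.pyRange 0 c 1).length : Int) = c := by
      rw [PySem.List.length_pyRange_one]; omega
    rw [hce, hlen]
    generalize i * c = t
    apply List.ext_getElem
    · simp only [List.length_reverse, PySem.List.length_pyRange_one, List.length_map]; omega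
    · intro k h1 h2
      simp only [List.length_reverse, PySem.List.length_pyRange_one] at h1
      simp only [List.getElem_reverse, PySem.List.length_pyRange_one,
        PySem.List.getElem_pyRange_one, List.getElem_map]
      omega
  · have hnil : PySem.List.pyRange 0 c 1 = [] := PySem.List.pyRange_one_eq_nil (by omega)
    rw [hnil]
    simp only [List.length_nil, Nat.cast_zero, add_zero, List.map_nil, List.reverse_eq_nil_iff]
    exact PySem.List.pyRange_one_eq_nil le_rfl

-- outer loop invariant: from counter i*max(col,0)+1, A's fold conses exactly B's rows (reversed)
theorem outer_fold_eq (col_1 : Int) (n : Nat) :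
    ∀ (i r : Int) (acc : List (List Int)), (r - i).toNat = n →
    ((PySem.List.pyRange i r 1).foldl
      (fun (st : List (List Int) × Int) j =>
        let inner := (PySem.List.pyRange 0 col_1 1).foldl
          (fun (st2 : List Int × Int) _j => (st2.2 :: st2.1, st2.2 + 1)) ([], st.2)
        (if PySem.Int.mod j 2 ≠ 0 then inner.1.reverse.reverse :: st.1 else inner.1.reverse :: st.1,
         inner.2))
      (acc, i * ((col_1.toNat : Int)) + 1)).1
    = ((PySem.List.pyRange i r 1).map (fun j =>
        (PySem.List.pyRange 0 col_1 1).map (fun m =>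
          if PySem.Int.mod j 2 ≠ 0 then j * col_1 + (col_1 - m) else j * col_1 + (m + 1)))).reverse
      ++ acc := by
  induction n with
  | zero =>
    intro i r acc h
    rw [show PySem.List.pyRange i r 1 = [] from PySem.List.pyRange_one_eq_nil (by omega)]
    simp
  | succ m ih =>
    intro i r acc h
    have hir : i < r := by omega
    rw [PySem.List.pyRange_one_cons hir]
    simp only [List.foldl_cons, List.map_cons, List.reverse_cons]
    rw [inner_fold_eq]
    have hk : i * ((col_1.toNat : Int)) + 1 + ((PySem.List.pyRange 0 col_1 1).length : Int)
        = (i + 1) * ((col_1.toNat : Int)) + 1 := by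
      rw [PySem.List.length_pyRange_one]
      have : ((col_1 - 0).toNat : Int) = ((col_1.toNat : Int)) := by omega
      rw [this]; ring
    by_cases hmod : PySem.Int.mod i 2 ≠ 0
    · simp only [if_pos hmod]
      have hrow : ((PySem.List.pyRange (i * ((col_1.toNat : Int)) + 1)
            (i * ((col_1.toNat : Int)) + 1 + ((PySem.List.pyRange 0 col_1 1).length : Int)) 1).reverse
            ++ ([] : List Int)).reverse.reverse
          = (PySem.List.pyRange 0 col_1 1).map (fun m => i * col_1 + (col_1 - m)) := by
        rw [List.append_nil, List.reverse_reverse]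
        exact rowA_odd col_1 i
      rw [hrow, hk, ih (i + 1) r _ (by omega)]
      simp [List.append_assoc]
    · simp only [if_neg hmod]
      have hrow : ((PySem.List.pyRange (i * ((col_1.toNat : Int)) + 1)
            (i * ((col_1.toNat : Int)) + 1 + ((PySem.List.pyRange 0 col_1 1).length : Int)) 1).reverse
            ++ ([] : List Int)).reverse
          = (PySem.List.pyRange 0 col_1 1).map (fun m => i * col_1 + (m + 1)) := by
        rw [List.append_nil, List.reverse_reverse]
        exact rowA_even col_1 i
      rw [hrow, hk, ih (i + 1) r _ (by omega)]
      simp [List.append_assoc]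

-- ===== VERDICT (by name: the statement is the Claim_ definition above) =====
theorem matrix_zz_spec : Claim_equal_matrix_zz := by
  intro row_1 col_1 _
  unfold Spec_matrix_zz matrix_zz matrix_zz_alt
  have h := outer_fold_eq col_1 (row_1 - 0).toNat 0 row_1 [] rfl
  rw [List.append_nil] at h
  rw [show (0 : Int) * ((col_1.toNat : Int)) + 1 = 1 from by ring] at h
  dsimp only
  rw [h, List.reverse_reverse]
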